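-- pv_equiv track=rewrite | github.com/NoLaCobra504/Hack-AI | ai_assistant.py | _is_conversational_request
-- ===== SOURCE A (Python) =====
-- def _is_conversational_request(user_input):
--     """Check if user is making a conversational request."""
--     conversational_patterns = [
--         'can you', 'could you', 'would you', 'will you',
--         'please', 'i need', 'i want', 'i would like',
--         'tell me', 'explain', 'describe', 'what is',
--         'how do', 'how can', 'what should', 'what would',
--         'is there', 'are there', 'do you have', 'do you know',
--         'i think', 'i believe', 'maybe', 'perhaps',
--         'thanks', 'thank you', 'good', 'great', 'awesome',
--         'cool', 'nice', 'interesting', 'wow', 'amazing'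
--     ]
--
--     return any(pattern in user_input for pattern in conversational_patterns)
-- ===== SOURCE B (Python) =====
-- _PATTERNS = (
--     "can you;could you;would you;will you;"
--     "please;i need;i want;i would like;"
--     "tell me;explain;describe;what is;"
--     "how do;how can;what should;what would;"
--     "is there;are there;do you have;do you know;"
--     "i think;i believe;maybe;perhaps;"
--     "thanks;thank you;good;great;awesome;"
--     "cool;nice;interesting;wow;amazing"
-- ).split(';')
--
--
-- def _is_conversational_request(user_input):
--     """Single left-to-right scan of the input: at each position, try only the
--     patterns whose first character matches, using startswith at that offset;
--     the pattern table is stored as one delimiter-joined string and split once."""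
--     for i in range(len(user_input)):
--         c = user_input[i]
--         for p in _PATTERNS:
--             if p[0] == c and user_input.startswith(p, i):
--                 return True
--     return False
-- ===== Notes on version B (the rewrite author's own statement) =====
-- stated objective: alternative
-- what changed: Replaces A's pattern-major loop of full-string substring tests ('p in s' once per pattern) by a single position-major left-to-right scan of the input that at each position tries only patterns passing a first-character guard via startswith; the pattern table is one delimiter-joined string split once at import.
import Mathlib
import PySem

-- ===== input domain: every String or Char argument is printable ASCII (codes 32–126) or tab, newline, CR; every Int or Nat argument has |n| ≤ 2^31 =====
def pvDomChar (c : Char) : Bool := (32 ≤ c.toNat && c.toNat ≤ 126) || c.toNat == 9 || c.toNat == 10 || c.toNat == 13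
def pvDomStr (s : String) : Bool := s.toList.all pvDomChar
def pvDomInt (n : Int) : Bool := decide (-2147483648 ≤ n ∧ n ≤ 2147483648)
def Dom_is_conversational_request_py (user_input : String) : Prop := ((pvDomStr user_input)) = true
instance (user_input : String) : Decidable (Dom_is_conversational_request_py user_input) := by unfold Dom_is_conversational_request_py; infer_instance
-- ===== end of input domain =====

-- B replaces A's per-pattern substring loop by one left-to-right scan of the input
-- with a first-character guard before each startswith test, over a pattern table
-- stored as a single delimiter-joined string split once (objective: alternative).


-- ===== PORT A =====
def conversationalPatterns : List String :=
  ["can you", "could you", "would you", "will you",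
   "please", "i need", "i want", "i would like",
   "tell me", "explain", "describe", "what is",
   "how do", "how can", "what should", "what would",
   "is there", "are there", "do you have", "do you know",
   "i think", "i believe", "maybe", "perhaps",
   "thanks", "thank you", "good", "great", "awesome",
   "cool", "nice", "interesting", "wow", "amazing"]

def is_conversational_request_py (user_input : String) : Bool :=
  conversationalPatterns.any (fun pattern => PySem.Str.isIn pattern user_input)

-- ===== PORT B =====
-- B's pattern table: one delimiter-joined string, split once (the module-level
-- `("…").split(';')` of Source B; PySem.Str.splitOn is exact for a nonempty sep).
def altPatterns : List String :=
  ((PySem.Chars.splitOn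
    ("can you;could you;would you;will you;please;i need;i want;i would like;tell me;explain;describe;what is;how do;how can;what should;what would;is there;are there;do you have;do you know;i think;i believe;maybe;perhaps;thanks;thank you;good;great;awesome;cool;nice;interesting;wow;amazing").toList
    [';']).map String.ofList)

-- B's inner loop at position i: the Python `p[0] == c and user_input.startswith(p, i)`;
-- the suffix user_input[i:] is carried as the recursion argument, so
-- `startswith(p, i)` is exactly `Chars.startswith suffix p.toList`.
def altScan : List Char → Bool
  | [] => false
  | c :: rest =>
    (altPatterns.any
      (fun p => (PySem.Str.pyGet? p 0 == some c) && PySem.Chars.startswith (c :: rest) p.toList))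
    || altScan rest

def is_conversational_request_py_alt (user_input : String) : Bool :=
  altScan user_input.toList

-- ===== PRECONDITION & SPEC =====
def Spec_is_conversational_request_py (user_input : String) (out : Bool) : Prop := out = is_conversational_request_py_alt user_input
instance (user_input : String) (out : Bool) : Decidable (Spec_is_conversational_request_py user_input out) := by unfold Spec_is_conversational_request_py; infer_instance

-- ===== CLAIM (what is proved, stated in full; the proofs are below) =====
def Claim_equal_is_conversational_request_py : Prop := ∀ (user_input : String), Dom_is_conversational_request_py user_input → Spec_is_conversational_request_py user_input (is_conversational_request_py user_input)

-- ===== LEMMAS AND PROOFS =====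

-- B's split-built table lists exactly A's patterns
set_option maxRecDepth 4000 in
lemma altPatterns_eq : altPatterns = conversationalPatterns := by decide

-- every pattern is nonempty
lemma patterns_ne_nil : ∀ p ∈ conversationalPatterns, p.toList ≠ [] := by decide

-- for a nonempty pattern, the first-character guard is absorbed by startswith
lemma guard_absorbed (p : String) (hp : p.toList ≠ []) (c : Char) (rest : List Char) :
    ((PySem.Str.pyGet? p 0 == some c) && PySem.Chars.startswith (c :: rest) p.toList)
      = PySem.Chars.startswith (c :: rest) p.toList := by
  cases hsw : PySem.Chars.startswith (c :: rest) p.toList with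
  | false => simp
  | true =>
    have hpre : p.toList <+: c :: rest := (PySem.Chars.startswith_iff _ _).mp hsw
    cases hl : p.toList with
    | nil => exact absurd hl hp
    | cons a t =>
      rw [hl] at hpre
      obtain ⟨u, hu⟩ := hpre
      simp only [List.cons_append] at hu
      have ha : a = c := (List.cons.injEq _ _ _ _).mp hu |>.1
      simp [PySem.Str.pyGet?, hl, ha, PySem.List.pyGet?, PySem.List.pyIdx?]

-- the main equivalence, on the character list
lemma scan_eq (cs : List Char) :
    conversationalPatterns.any (fun p => PySem.Chars.isIn p.toList cs) = altScan cs := by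
  induction cs with
  | nil =>
    decide
  | cons c rest ih =>
    rw [altScan, altPatterns_eq]
    rw [← ih]
    rw [Bool.eq_iff_iff]
    simp only [List.any_eq_true, Bool.or_eq_true]
    constructor
    · rintro ⟨p, hp, hin⟩
      rcases (List.infix_cons_iff).mp ((PySem.Chars.isIn_iff_infix _ _).mp hin) with h | h
      · exact Or.inl ⟨p, hp, (guard_absorbed p (patterns_ne_nil p hp) c rest).symm ▸
          (PySem.Chars.startswith_iff _ _).mpr h⟩
      · exact Or.inr ⟨p, hp, (PySem.Chars.isIn_iff_infix _ _).mpr h⟩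
    · rintro (⟨p, hp, h⟩ | ⟨p, hp, h⟩)
      · rw [guard_absorbed p (patterns_ne_nil p hp) c rest] at h
        exact ⟨p, hp, (PySem.Chars.isIn_iff_infix _ _).mpr
          (List.infix_cons_iff.mpr (Or.inl ((PySem.Chars.startswith_iff _ _).mp h)))⟩
      · exact ⟨p, hp, (PySem.Chars.isIn_iff_infix _ _).mpr
          (List.infix_cons_iff.mpr (Or.inr ((PySem.Chars.isIn_iff_infix _ _).mp h)))⟩

-- ===== VERDICT (by name: the statement is the Claim_ definition above) =====
theorem is_conversational_request_py_spec : Claim_equal_is_conversational_request_py := by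
  intro s _
  unfold Spec_is_conversational_request_py is_conversational_request_py is_conversational_request_py_alt
  rw [← scan_eq]
  simp [PySem.Str.isIn]
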